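-- pv_equiv track=rewrite | github.com/zubalr/agentic-search | scripts/select_representative_keywords.py | group_similar_keywords
-- ===== SOURCE A (Python) =====
-- def group_similar_keywords(keywords, min_group_size=3):
--     groups = []
--     current_group = []
--     for i, kw in enumerate(keywords):
--         if not current_group or kw.startswith(current_group[-1]):
--             current_group.append(kw)
--         else:
--             if len(current_group) >= min_group_size:
--                 groups.append(current_group)
--             else:
--                 groups.extend([[k] for k in current_group])
--             current_group = [kw]
--     if current_group:
--         if len(current_group) >= min_group_size:
--             groups.append(current_group)
--         else:
--             groups.extend([[k] for k in current_group])
--     return groups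
-- ===== SOURCE B (Python) =====
-- def group_similar_keywords(keywords, min_group_size=3):
--     keywords = list(keywords)
--     if not keywords:
--         return []
--     # Boundary indices: i+1 whenever keywords[i+1] does not extend keywords[i].
--     bounds = [0] \
--         + [i + 1 for i, (p, k) in enumerate(zip(keywords, keywords[1:]))
--            if not k.startswith(p)] \
--         + [len(keywords)]
--     out = []
--     for a, b in zip(bounds, bounds[1:]):
--         if b - a >= min_group_size:
--             out.append(keywords[a:b])
--         else:
--             out.extend([k] for k in keywords[a:b])
--     return out
-- ===== Notes on version B (the rewrite author's own statement) =====
-- stated objective: alternative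
-- what changed: Instead of A's stateful loop that grows/flushes a current group, B computes the list of break indices by a pairwise comparison of consecutive keywords (enumerate+zip comprehension) and then emits slices keywords[a:b] between consecutive bounds, splitting a slice into singletons when b-a < min_group_size.
import Mathlib
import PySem

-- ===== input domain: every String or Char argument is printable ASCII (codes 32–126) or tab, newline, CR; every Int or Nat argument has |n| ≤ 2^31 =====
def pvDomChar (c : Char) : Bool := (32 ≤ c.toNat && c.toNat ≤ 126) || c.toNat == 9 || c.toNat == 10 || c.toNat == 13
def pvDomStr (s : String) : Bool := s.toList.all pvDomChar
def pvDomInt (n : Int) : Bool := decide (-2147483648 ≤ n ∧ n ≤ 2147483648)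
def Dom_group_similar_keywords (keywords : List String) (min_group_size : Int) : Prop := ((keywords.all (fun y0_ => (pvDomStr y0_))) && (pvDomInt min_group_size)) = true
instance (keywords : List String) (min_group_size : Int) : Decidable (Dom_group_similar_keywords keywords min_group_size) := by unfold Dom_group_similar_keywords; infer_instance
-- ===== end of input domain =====

-- B replaces A's stateful group-growing loop by an index-based algorithm: compute the list
-- of break positions via a pairwise comparison of consecutive keywords, then emit the
-- slices between consecutive bounds; alternative structure, same asymptotic cost.

-- ===== PORT A =====
-- flush code A repeats twice: append the whole group or one singleton per keyword
def flushA (min_group_size : Int) (groups : List (List String)) (cur : List String) : List (List String) :=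
  if min_group_size ≤ (cur.length : Int) then groups ++ [cur]
  else groups ++ cur.map (fun k => [k])

def loopA (min_group_size : Int) (groups : List (List String)) (cur : List String) :
    List String → List (List String)
  | [] => if cur = [] then groups else flushA min_group_size groups cur
  | kw :: rest =>
      if cur.isEmpty || PySem.Str.startswith kw ((PySem.List.pyGet? cur (-1)).getD "") then
        loopA min_group_size groups (cur ++ [kw]) rest
      else
        loopA min_group_size (flushA min_group_size groups cur) [kw] rest

def group_similar_keywords (keywords : List String) (min_group_size : Int) : List (List String) :=
  loopA min_group_size [] [] keywords

-- ===== PORT B =====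
-- break positions: i+1 for each adjacent pair (p, k) = (keywords[i], keywords[i+1]) with ¬ k.startswith(p)
def pyBreaks (keywords : List String) : List Int :=
  (PySem.List.enumerate (keywords.zip keywords.tail)).filterMap
    (fun x => if PySem.Str.startswith x.2.2 x.2.1 then none else some (x.1 + 1))

def group_similar_keywords_alt (keywords : List String) (min_group_size : Int) : List (List String) :=
  if keywords.isEmpty then [] else
  let bounds : List Int := 0 :: (pyBreaks keywords ++ [(keywords.length : Int)])
  (bounds.zip bounds.tail).foldl
    (fun out ab =>
      if min_group_size ≤ ab.2 - ab.1 then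
        out ++ [PySem.List.slice keywords (some ab.1) (some ab.2)]
      else
        out ++ (PySem.List.slice keywords (some ab.1) (some ab.2)).map (fun k => [k])) []

-- ===== PRECONDITION & SPEC =====
def Spec_group_similar_keywords (keywords : List String) (min_group_size : Int) (out : List (List String)) : Prop := out = group_similar_keywords_alt keywords min_group_size
instance (keywords : List String) (min_group_size : Int) (out : List (List String)) : Decidable (Spec_group_similar_keywords keywords min_group_size out) := by unfold Spec_group_similar_keywords; infer_instance

-- ===== CLAIM (what is proved, stated in full; the proofs are below) =====
def Claim_equal_group_similar_keywords : Prop := ∀ (keywords : List String) (min_group_size : Int), Dom_group_similar_keywords keywords min_group_size → Spec_group_similar_keywords keywords min_group_size (group_similar_keywords keywords min_group_size)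

-- ===== LEMMAS AND PROOFS =====

-- proof-side description of one chain step: the longest prefix chained onto prev, and the rest
def chainSplit (prev : String) : List String → List String × List String
  | [] => ([], [])
  | kw :: rest =>
      if PySem.Str.startswith kw prev then
        ((kw :: (chainSplit kw rest).1), (chainSplit kw rest).2)
      else ([], kw :: rest)

theorem chainSplit_snd_le (l : List String) : ∀ prev, (chainSplit prev l).2.length ≤ l.length := by
  induction l with
  | nil => intro prev; simp [chainSplit]
  | cons kw rest ih =>
      intro prev
      simp only [chainSplit]
      split
      · exact Nat.le_succ_of_le (ih kw)
      · simp

theorem chainSplit_append (l : List String) : ∀ prev,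
    (chainSplit prev l).1 ++ (chainSplit prev l).2 = l := by
  induction l with
  | nil => intro prev; simp [chainSplit]
  | cons kw rest ih =>
      intro prev
      simp only [chainSplit]
      split
      · simp [ih kw]
      · simp

-- proof-side: the list of maximal prefix-chain runs
def chainRuns : List String → List (List String)
  | [] => []
  | kw :: rest => (kw :: (chainSplit kw rest).1) :: chainRuns (chainSplit kw rest).2
termination_by l => l.length
decreasing_by
  exact Nat.lt_succ_of_le (chainSplit_snd_le rest kw)

def emit (m : Int) (run : List String) : List (List String) :=
  if m ≤ (run.length : Int) then [run] else run.map (fun k => [k])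

theorem flushA_eq (m : Int) (groups : List (List String)) (cur : List String) :
    flushA m groups cur = groups ++ emit m cur := by
  unfold flushA emit; split <;> rfl

theorem loopA_eq (m : Int) (rest : List String) : ∀ (groups : List (List String))
    (cur : List String) (p : String), cur.getLast? = some p →
    loopA m groups cur rest =
      groups ++ ((cur ++ (chainSplit p rest).1) :: chainRuns (chainSplit p rest).2).flatMap (emit m) := by
  induction rest with
  | nil =>
      intro groups cur p hp
      have hne : cur ≠ [] := by intro h; subst h; simp at hp
      simp [loopA, hne, chainSplit, chainRuns, flushA_eq]
  | cons kw rest ih =>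
      intro groups cur p hp
      have hne : cur ≠ [] := by intro h; subst h; simp at hp
      have hget : PySem.List.pyGet? cur (-1) = some p := by
        rw [PySem.List.pyGet?_neg_one, hp]
      simp only [loopA, List.isEmpty_eq_false_iff.mpr hne, hget, Option.getD_some, Bool.false_or]
      by_cases hs : PySem.Str.startswith kw p = true
      · rw [if_pos hs]
        rw [ih groups (cur ++ [kw]) kw (by simp)]
        simp only [chainSplit, if_pos hs]
        simp [List.append_assoc]
      · rw [if_neg hs]
        rw [ih (flushA m groups cur) [kw] kw (by simp)]
        simp only [chainSplit, if_neg hs]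
        rw [flushA_eq]
        have : chainRuns (kw :: rest) = (kw :: (chainSplit kw rest).1) :: chainRuns (chainSplit kw rest).2 := by
          rw [chainRuns]
        rw [this]
        simp [List.append_assoc]

theorem A_eq_chain (m : Int) (k : String) (rest : List String) :
    group_similar_keywords (k :: rest) m = (chainRuns (k :: rest)).flatMap (emit m) := by
  unfold group_similar_keywords
  have hA : loopA m [] [] (k :: rest) = loopA m [] [k] rest := by
    simp [loopA]
  rw [hA, loopA_eq m rest [] [k] k (by simp)]
  have : chainRuns (k :: rest) = (k :: (chainSplit k rest).1) :: chainRuns (chainSplit k rest).2 := by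
    rw [chainRuns]
  rw [this]
  simp

-- break-index side --------------------------------------------------------

def brkF : Int × (String × String) → Option Int :=
  fun x => if PySem.Str.startswith x.2.2 x.2.1 then none else some (x.1 + 1)

theorem pyBreaks_def (l : List String) :
    pyBreaks l = (PySem.List.enumerate (l.zip l.tail)).filterMap brkF := rfl

theorem brk_shift (z : List (String × String)) : ∀ (s : Int),
    (PySem.List.enumerate z s).filterMap brkF =
      ((PySem.List.enumerate z 0).filterMap brkF).map (· + s) := by
  induction z with
  | nil => intro s; simp [PySem.List.enumerate_nil]
  | cons x z ih =>
      intro s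
      simp only [PySem.List.enumerate_cons, List.filterMap_cons, ih (s + 1), ih (0 + 1)]
      by_cases hs : PySem.Str.startswith x.2 x.1 = true
      · simp only [brkF, hs, ite_true, List.map_map]
        congr 1
        funext v; simp; ring
      · simp only [brkF, hs, Bool.false_eq_true, ite_false, List.map_cons, List.map_map]
        congr 1
        · ring
        · congr 1
          funext v; simp; ring

theorem pyBreaks_cons₂ (a b : String) (t : List String) :
    pyBreaks (a :: b :: t) =
      (if PySem.Str.startswith b a then [] else [(1 : Int)]) ++ (pyBreaks (b :: t)).map (· + 1) := by
  rw [pyBreaks_def, pyBreaks_def]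
  have hz : (a :: b :: t).zip (a :: b :: t).tail = (a, b) :: ((b :: t).zip t) := by simp
  have hz2 : (b :: t).zip (b :: t).tail = (b :: t).zip t := by simp
  rw [hz, hz2, PySem.List.enumerate_cons, List.filterMap_cons, brk_shift]
  unfold brkF
  by_cases hs : PySem.Chars.startswith b.toList a.toList = true
  · simp [PySem.Str.startswith, hs]
  · simp [PySem.Str.startswith, hs]

theorem pyBreaks_chain (rest : List String) : ∀ (k : String),
    pyBreaks (k :: rest) =
      if (chainSplit k rest).2 = [] then []
      else ((1 + (chainSplit k rest).1.length : Nat) : Int) ::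
        (pyBreaks (chainSplit k rest).2).map (· + ((1 + (chainSplit k rest).1.length : Nat) : Int)) := by
  induction rest with
  | nil => intro k; simp [chainSplit, pyBreaks, PySem.List.enumerate_nil]
  | cons kw t ih =>
      intro k
      rw [pyBreaks_cons₂]
      by_cases hs : PySem.Str.startswith kw k = true
      · simp only [chainSplit, if_pos hs, ih kw]
        by_cases hr : (chainSplit kw t).2 = []
        · simp [hr]
        · simp only [hr, List.map_cons, List.map_map, List.nil_append, ite_false,
            List.length_cons]
          refine List.cons_eq_cons.mpr ⟨by push_cast; ring, ?_⟩
          refine List.map_congr_left fun v _ => ?_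
          simp only [Function.comp_apply]
          push_cast; ring
      · simp only [chainSplit, if_neg hs]
        simp

-- the B foldl over consecutive bound pairs, on the full list K, equals flatMap emit of chainRuns
theorem B_loop (m : Int) : ∀ (n : Nat) (l : List String), l.length ≤ n → l ≠ [] →
    ∀ (p : List String) (acc : List (List String)),
    (((0 :: (pyBreaks l ++ [(l.length : Int)])).map (· + (p.length : Int))).zip
      (((0 :: (pyBreaks l ++ [(l.length : Int)])).map (· + (p.length : Int))).tail)).foldl
      (fun out ab =>
        if m ≤ ab.2 - ab.1 then
          out ++ [PySem.List.slice (p ++ l) (some ab.1) (some ab.2)]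
        else
          out ++ (PySem.List.slice (p ++ l) (some ab.1) (some ab.2)).map (fun k => [k])) acc
      = acc ++ (chainRuns l).flatMap (emit m) := by
  intro n
  induction n with
  | zero =>
      intro l hl hne
      cases l with
      | nil => exact absurd rfl hne
      | cons a t => simp at hl
  | succ n ih =>
      intro l hl hne p acc
      cases l with
      | nil => exact absurd rfl hne
      | cons k rest =>
          rw [pyBreaks_chain rest k]
          have hsplit : (chainSplit k rest).1 ++ (chainSplit k rest).2 = rest :=
            chainSplit_append rest k
          set c := (chainSplit k rest).1 with hc
          set r := (chainSplit k rest).2 with hr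
          have hKL : (p ++ (k :: rest)) = (p ++ (k :: c)) ++ r := by
            rw [← hsplit]; simp
          have hslice : ∀ (q : List String) (tl : List String),
              PySem.List.slice (q ++ tl) (some (0 + (q.length : Int)))
                (some (((tl.length : Nat) : Int) + (q.length : Int))) = tl := by
            intro q tl
            have h1 : ((0 : Int) + (q.length : Int)) = ((q.length : Nat) : Int) := by ring
            have h2 : (((tl.length : Nat) : Int) + (q.length : Int))
                = ((q.length : Nat) : Int) + ((tl.length : Nat) : Int) := by ring
            rw [h1, h2, PySem.List.slice_natCast_add]
            simp
          by_cases hrnil : r = []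
          · -- single run: rest = c, bounds are [P, len + P]
            have hrest : rest = c := by rw [← hsplit, hrnil]; simp
            simp only [hrnil, ite_true, List.nil_append, List.map_cons,
              List.map_nil, List.zip_cons_cons, List.tail_cons, List.zip_nil_right,
              List.foldl_cons, List.foldl_nil]
            have hchain : chainRuns (k :: rest) = [k :: c] := by
              rw [chainRuns, ← hc, ← hr, hrnil]; simp [chainRuns]
            have hlen : (k :: rest).length = (k :: c).length := by rw [hrest]
            have hK : p ++ (k :: rest) = p ++ (k :: c) := by rw [hrest]
            rw [hlen, hK, hslice p (k :: c)]
            have hdiff : (((k :: c).length : Nat) : Int) + (p.length : Int) - (0 + (p.length : Int))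
                = ((k :: c).length : Int) := by ring
            rw [hdiff, hchain]
            unfold emit
            split_ifs with hm <;>
              simp only [List.length_cons, Nat.cast_add, Nat.cast_one] at hm <;>
              simp <;> intro hx <;> omega
          · -- first run k::c, then recurse on r
            have hd : ((1 + c.length : Nat) : Int) = ((k :: c).length : Int) := by
              simp; ring
            have hlenl : ((k :: rest).length : Int)
                = ((r.length : Nat) : Int) + ((k :: c).length : Int) := by
              rw [← hsplit]; simp; ring
            simp only [if_neg hrnil, hd]
            -- shape: bounds = (0+P) :: ((k::c).len + P) :: map (+P) (map (+len) br ++ [L])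
            simp only [List.map_cons, List.cons_append, List.map_append, List.map_map,
              List.zip_cons_cons, List.tail_cons, List.foldl_cons]
            -- rewrite the remaining bound pairs as the shifted bounds of r
            have hP' : ((p ++ (k :: c)).length : Int) = ((k :: c).length : Int) + (p.length : Int) := by
              simp; ring
            have htailb :
                ((((k :: c).length : Int) + (p.length : Int)) ::
                  (List.map ((fun x => x + (p.length : Int)) ∘ (fun x => x + ((k :: c).length : Int))) (pyBreaks r)
                    ++ [((k :: rest).length : Int) + (p.length : Int)]))
                = List.map (fun x => x + ((p ++ (k :: c)).length : Int)) (0 :: (pyBreaks r ++ [(r.length : Int)])) := by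
              simp only [List.map_cons, List.map_append]
              refine List.cons_eq_cons.mpr ⟨by rw [hP']; ring, ?_⟩
              congr 1
              · refine List.map_congr_left fun v _ => ?_
                simp only [Function.comp_apply]
                rw [hP']; ring
              · rw [hlenl, hP']; simp; ring
            have hKL2 : p ++ k :: rest = (p ++ k :: c) ++ r := by
              rw [← hsplit]; simp
            have hr2 : r.length ≤ n := by
              have hle := chainSplit_snd_le rest k
              rw [← hr] at hle
              simp only [List.length_cons] at hl
              omega
            have harith : (((k :: c).length : Int) + (p.length : Int) - (0 + (p.length : Int)))
                = ((k :: c).length : Int) := by ring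
            have hsl : PySem.List.slice ((p ++ k :: c) ++ r) (some ((0 : Int) + (p.length : Int)))
                (some (((k :: c).length : Int) + (p.length : Int))) = k :: c := by
              have h1 : ((0 : Int) + (p.length : Int)) = ((p.length : Nat) : Int) := by ring
              have h2 : (((k :: c).length : Int) + (p.length : Int))
                  = ((p.length : Nat) : Int) + (((k :: c).length : Nat) : Int) := by ring
              rw [List.append_assoc, h1, h2, PySem.List.slice_natCast_add, List.drop_left,
                List.take_left]
            simp only [List.map_nil, hKL2, harith, hsl]
            have htail2 : (List.map ((fun x => x + (p.length : Int)) ∘ (fun x => x + ((k :: c).length : Int))) (pyBreaks r)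
                  ++ [((k :: rest).length : Int) + (p.length : Int)])
                = (List.map (fun x => x + ((p ++ (k :: c)).length : Int)) (0 :: (pyBreaks r ++ [(r.length : Int)]))).tail := by
              rw [← htailb]
              rfl
            rw [htailb, htail2, ih r hr2 hrnil (p ++ k :: c)]
            have hchain2 : chainRuns (k :: rest) = (k :: c) :: chainRuns r := by
              rw [chainRuns]
            rw [hchain2]
            simp only [List.flatMap_cons]
            unfold emit
            split_ifs <;> simp [List.append_assoc]

-- ===== VERDICT (by name: the statement is the Claim_ definition above) =====
theorem group_similar_keywords_spec : Claim_equal_group_similar_keywords := by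
  intro keywords m _
  unfold Spec_group_similar_keywords
  cases keywords with
  | nil => rfl
  | cons k rest =>
      have hB := B_loop m (k :: rest).length (k :: rest) le_rfl (by simp) [] []
      simp only [List.length_nil, Nat.cast_zero, add_zero, List.map_id', List.nil_append] at hB
      rw [A_eq_chain, ← hB]
      unfold group_similar_keywords_alt
      simp
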